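-- pv_equiv track=rewrite | github.com/piskuliche/My-Code-Collection | Simulation_Analysis/Pair-Distribution/python_2d_rdf/conv_dump_to_data.py | pull_sections
-- ===== SOURCE A (Python) =====
-- def pull_header(lines):
--     h_lines = []
--     for line in lines:
--         if "Masses" in line:
--             break
--         h_lines.append(line)
--     return h_lines
--
-- def pull_sections(lines):
--     header=pull_header(lines)
--     nheader = len(header)
--     lines=lines[nheader:]
--     flag=0
--     sections={}
--     sec = None
--     for line in lines:
--         cleanline = line.strip().split()
--         if len(cleanline)==1 and cleanline != "\n":
--             sec=cleanline[0]
--             sections[sec]=[]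
--         if sec is not None and len(cleanline) > 1:
--                 sections[sec].append(line)
--     return header,sections
-- ===== SOURCE B (Python) =====
-- def pull_sections(lines):
--     header = []
--     sections = {}
--     sec = None
--     in_header = True
--     for line in lines:
--         if in_header and "Masses" in line:
--             in_header = False
--         if in_header:
--             header.append(line)
--         else:
--             toks = line.strip().split()
--             if len(toks) == 1:
--                 sec = toks[0]
--                 sections[sec] = []
--             elif sec is not None and len(toks) > 1:
--                 sections[sec].append(line)
--     return header, sections
-- ===== Notes on version B (the rewrite author's own statement) =====
-- stated objective: simpler
-- what changed: Replaces A's three-phase structure (pull_header helper, list slicing, then a second scan for sections) by a single pass over the lines with a boolean phase flag, dropping the vacuous cleanline != "\n" check.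
import Mathlib
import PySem

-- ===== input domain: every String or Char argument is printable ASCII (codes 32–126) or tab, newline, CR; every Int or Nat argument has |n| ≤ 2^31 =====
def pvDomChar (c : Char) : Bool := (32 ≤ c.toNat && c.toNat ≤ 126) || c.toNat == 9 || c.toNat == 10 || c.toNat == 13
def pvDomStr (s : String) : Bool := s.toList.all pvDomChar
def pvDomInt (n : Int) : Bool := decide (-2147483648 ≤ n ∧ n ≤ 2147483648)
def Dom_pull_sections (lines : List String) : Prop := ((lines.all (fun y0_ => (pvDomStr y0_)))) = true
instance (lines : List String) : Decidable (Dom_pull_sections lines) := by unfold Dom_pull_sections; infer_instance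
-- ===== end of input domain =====

-- B replaces A's three-phase structure (pull_header, slice, re-scan) by one single pass
-- with a boolean phase flag; objective: simpler (one traversal, no helper/slice), not faster.

-- ===== PORT A =====
-- helper pull_header: loop with break on the first line containing "Masses"
def pull_header : List String → List String
  | [] => []
  | line :: rest =>
    if PySem.Str.isIn "Masses" line then [] else line :: pull_header rest

-- body of A's section loop (one iteration over state (sec, sections))
def pvStepA (st : Option String × PySem.Dict String (List String)) (line : String) :
    Option String × PySem.Dict String (List String) :=
  let cleanline := PySem.Str.split₀ (PySem.Str.strip line)
  -- 'cleanline != "\n"' in A compares a list with a string and is always True; omitted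
  -- len(cleanline) == 1: cleanline[0] is its head (headD's default is unreachable)
  let st := if cleanline.length = 1 then
      (some (cleanline.headD ""), st.2.insert (cleanline.headD "") ([] : List String))
    else st
  match st.1 with
  | some sec =>
      if cleanline.length > 1 then (some sec, st.2.modify sec [] (· ++ [line])) else st
  | none => st

def pull_sections (lines : List String) : List String × (List (String × List String)) :=
  let header := pull_header lines
  let nheader : Int := header.length
  let lines := PySem.List.slice lines (some nheader) none
  let st := lines.foldl pvStepA ((none : Option String), (PySem.Dict.empty : PySem.Dict String (List String)))
  (header, st.2.items)

-- ===== PORT B =====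
-- body of B's single loop over state (in_header, header, sec, sections)
def pvStepB (st : Bool × List String × Option String × PySem.Dict String (List String))
    (line : String) : Bool × List String × Option String × PySem.Dict String (List String) :=
  let (inHeader, header, sec, sections) := st
  let inHeader := if inHeader && PySem.Str.isIn "Masses" line then false else inHeader
  if inHeader then (true, header ++ [line], sec, sections)
  else
    let toks := PySem.Str.split₀ (PySem.Str.strip line)
    if toks.length = 1 then
      -- len(toks) == 1: toks[0] is its head (headD's default is unreachable)
      (false, header, some (toks.headD ""), sections.insert (toks.headD "") ([] : List String))
    else
      match sec with
      | some s =>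
          if toks.length > 1 then (false, header, some s, sections.modify s [] (· ++ [line]))
          else (false, header, sec, sections)
      | none => (false, header, sec, sections)

def pull_sections_alt (lines : List String) : List String × (List (String × List String)) :=
  let st := lines.foldl pvStepB
    (true, ([] : List String), (none : Option String), (PySem.Dict.empty : PySem.Dict String (List String)))
  (st.2.1, st.2.2.2.items)

-- ===== PRECONDITION & SPEC =====
def Spec_pull_sections (lines : List String) (out : List String × (List (String × List String))) : Prop := out = pull_sections_alt lines
instance (lines : List String) (out : List String × (List (String × List String))) : Decidable (Spec_pull_sections lines out) := by unfold Spec_pull_sections; infer_instance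

-- ===== CLAIM (what is proved, stated in full; the proofs are below) =====
def Claim_equal_pull_sections : Prop := ∀ (lines : List String), Dom_pull_sections lines → Spec_pull_sections lines (pull_sections lines)

-- ===== LEMMAS AND PROOFS =====

-- in section phase (flag false) B's step is exactly A's step, carrying header along
theorem pvStepB_false (h : List String) (sec : Option String)
    (d : PySem.Dict String (List String)) (line : String) :
    pvStepB (false, h, sec, d) line =
      (false, h, pvStepA (sec, d) line) := by
  simp only [pvStepB, pvStepA, Bool.false_and, Bool.false_eq_true, if_false]
  generalize PySem.Str.split₀ (PySem.Str.strip line) = toks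
  by_cases h1 : toks.length = 1
  · simp [h1]
  · simp only [if_neg h1]
    cases sec with
    | none => rfl
    | some s => by_cases h2 : toks.length > 1 <;> simp [h2]

theorem foldB_false (lines : List String) (h : List String) (sec : Option String)
    (d : PySem.Dict String (List String)) :
    lines.foldl pvStepB (false, h, sec, d) =
      (false, h, lines.foldl pvStepA (sec, d)) := by
  induction lines generalizing sec d with
  | nil => rfl
  | cons line rest ih =>
    simp only [List.foldl_cons, pvStepB_false]
    rcases pvStepA (sec, d) line with ⟨s', d'⟩
    exact ih s' d' 

theorem pvStepB_masses (h : List String) (sec : Option String)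
    (d : PySem.Dict String (List String)) (line : String)
    (hM : PySem.Str.isIn "Masses" line = true) :
    pvStepB (true, h, sec, d) line = pvStepB (false, h, sec, d) line := by
  simp only [pvStepB, hM, Bool.and_true, if_true,
    Bool.false_eq_true, if_false]

theorem pvStepB_no_masses (h : List String) (sec : Option String)
    (d : PySem.Dict String (List String)) (line : String)
    (hM : PySem.Str.isIn "Masses" line = false) :
    pvStepB (true, h, sec, d) line = (true, h ++ [line], sec, d) := by
  simp only [pvStepB, hM, Bool.and_false, Bool.false_eq_true, if_false, if_true]

theorem foldB_header (lines : List String) (h : List String) :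
    (lines.foldl pvStepB (true, h, (none : Option String), PySem.Dict.empty)).2 =
      ((lines.drop (pull_header lines).length).foldl pvStepB
        (false, h ++ pull_header lines, (none : Option String), PySem.Dict.empty)).2 := by
  induction lines generalizing h with
  | nil => simp [pull_header]
  | cons line rest ih =>
    cases hM : PySem.Str.isIn "Masses" line with
    | true =>
      simp only [pull_header, if_pos hM, List.length_nil, List.drop_zero, List.append_nil,
        List.foldl_cons, pvStepB_masses _ _ _ _ hM]
    | false =>
      have hne : ¬ PySem.Str.isIn "Masses" line = true := by rw [hM]; exact Bool.false_ne_true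
      simp only [pull_header, if_neg hne, List.length_cons, List.foldl_cons,
        pvStepB_no_masses _ _ _ _ hM, List.drop_succ_cons]
      rw [ih (h ++ [line])]
      simp

-- ===== VERDICT (by name: the statement is the Claim_ definition above) =====
theorem pull_sections_spec : Claim_equal_pull_sections := by
  intro lines _
  unfold Spec_pull_sections pull_sections pull_sections_alt
  have hslice : PySem.List.slice lines (some ((pull_header lines).length : Int)) none
      = lines.drop (pull_header lines).length := by
    rw [PySem.List.slice_from lines (by positivity)]
    simp
  have hB := foldB_header lines []
  rw [foldB_false] at hB
  simp only [List.nil_append] at hB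
  simp only [hslice, hB]
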